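-- pv_equiv track=rewrite | github.com/superjcd/NLP_Application | evaluation/word_segment/utility.py | words_to_index
-- ===== SOURCE A (Python) =====
-- def words_to_index(seg_sentence):
--     index = 0
--     res = []
--     for word in seg_sentence:
--         word_index = [index]
--         index += len(word)
--         word_index.append(index)
--         res.append(word_index)
--     return res
-- ===== SOURCE B (Python) =====
-- def words_to_index(seg_sentence):
--     bounds = [0]
--     for w in seg_sentence:
--         bounds.append(bounds[-1] + len(w))
--     return [[a, b] for a, b in zip(bounds, bounds[1:])]
-- ===== Notes on version B (the rewrite author's own statement) =====
-- stated objective: alternative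
-- what changed: Replaces A's running-accumulator pass that builds each pair in place with a prefix-sum boundary table followed by a pairing pass over consecutive boundaries.
import Mathlib
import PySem

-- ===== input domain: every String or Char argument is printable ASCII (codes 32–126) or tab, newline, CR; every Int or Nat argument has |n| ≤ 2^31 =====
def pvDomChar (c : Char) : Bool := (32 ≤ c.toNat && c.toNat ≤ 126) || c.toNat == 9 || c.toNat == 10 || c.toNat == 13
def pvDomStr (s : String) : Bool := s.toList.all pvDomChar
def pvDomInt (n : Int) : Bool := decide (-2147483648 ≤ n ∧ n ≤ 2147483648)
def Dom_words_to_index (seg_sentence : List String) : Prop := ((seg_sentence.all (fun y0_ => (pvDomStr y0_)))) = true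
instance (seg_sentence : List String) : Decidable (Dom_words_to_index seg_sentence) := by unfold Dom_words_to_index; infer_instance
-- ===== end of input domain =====

-- B builds a prefix-sum boundary table and then pairs consecutive boundaries,
-- instead of A's running accumulator that emits each pair in place (objective: alternative decomposition).

-- ===== PORT A =====
-- A: single pass with running `index`, appending [index, index+len(word)] to res.
def words_to_index (seg_sentence : List String) : List (List Int) :=
  (seg_sentence.foldl
    (fun (st : Int × List (List Int)) word =>
      let index := st.1
      let index' := index + PySem.Str.len word
      (index', st.2 ++ [[index, index']]))
    (0, [])).2

-- ===== PORT B =====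
-- B: boundary table bounds = scan of lengths from 0 (the `bounds` loop), then pair
-- consecutive boundaries via zip bounds bounds.tail (Python's zip(bounds, bounds[1:])).
def words_to_index_alt (seg_sentence : List String) : List (List Int) :=
  let bounds := seg_sentence.foldl (fun (b : List Int) w => b ++ [b.getLastD 0 + PySem.Str.len w]) [0]
  (bounds.zip bounds.tail).map (fun p => [p.1, p.2])

-- ===== PRECONDITION & SPEC =====
def Spec_words_to_index (seg_sentence : List String) (out : List (List Int)) : Prop := out = words_to_index_alt seg_sentence
instance (seg_sentence : List String) (out : List (List Int)) : Decidable (Spec_words_to_index seg_sentence out) := by unfold Spec_words_to_index; infer_instance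

-- ===== CLAIM (what is proved, stated in full; the proofs are below) =====
def Claim_equal_words_to_index : Prop := ∀ (seg_sentence : List String), Dom_words_to_index seg_sentence → Spec_words_to_index seg_sentence (words_to_index seg_sentence)

-- ===== LEMMAS AND PROOFS =====

-- A's loop, started at index i with accumulator acc.
def pvAStep (st : Int × List (List Int)) (word : String) : Int × List (List Int) :=
  let index := st.1
  let index' := index + PySem.Str.len word
  (index', st.2 ++ [[index, index']])

-- B's boundary loop, started from a nonempty prefix whose last element is i.
def pvBounds (i : Int) (ws : List String) : List Int :=
  ws.foldl (fun (b : List Int) w => b ++ [b.getLastD 0 + PySem.Str.len w]) [i]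

lemma pvBounds_shift (i : Int) (ws : List String) (pre : List Int) :
    ws.foldl (fun (b : List Int) w => b ++ [b.getLastD 0 + PySem.Str.len w]) (pre ++ [i])
      = pre ++ pvBounds i ws := by
  induction ws generalizing i pre with
  | nil => simp [pvBounds]
  | cons w ws ih =>
      show List.foldl _ ((pre ++ [i]) ++ [(pre ++ [i]).getLastD 0 + PySem.Str.len w]) ws
            = pre ++ pvBounds i (w :: ws)
      have hb : pvBounds i (w :: ws) = [i] ++ pvBounds (i + PySem.Str.len w) ws := by
        show List.foldl _ (([i] : List Int) ++ [([i] : List Int).getLastD 0 + PySem.Str.len w]) ws = _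
        simpa using ih (i + PySem.Str.len w) [i]
      rw [hb, show (pre ++ [i]).getLastD 0 = i by simp]
      simpa [List.append_assoc] using ih (i + PySem.Str.len w) (pre ++ [i])

lemma pvBounds_cons (i : Int) (w : String) (ws : List String) :
    pvBounds i (w :: ws) = i :: pvBounds (i + PySem.Str.len w) ws := by
  show List.foldl _ (([i] : List Int) ++ [([i] : List Int).getLastD 0 + PySem.Str.len w]) ws = _
  simpa using pvBounds_shift (i + PySem.Str.len w) ws [i]

def pvPairs (i : Int) (ws : List String) : List (List Int) :=
  ((pvBounds i ws).zip (pvBounds i ws).tail).map (fun p => [p.1, p.2])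

lemma pvBounds_ne_nil (i : Int) (ws : List String) : pvBounds i ws ≠ [] := by
  cases ws with
  | nil => simp [pvBounds]
  | cons w ws => rw [pvBounds_cons]; simp

lemma pvBounds_head (i : Int) (ws : List String) :
    (pvBounds i ws).headD 0 = i := by
  cases ws with
  | nil => simp [pvBounds]
  | cons w ws => simp [pvBounds_cons]

lemma pvPairs_cons (i : Int) (w : String) (ws : List String) :
    pvPairs i (w :: ws) = [i, i + PySem.Str.len w] :: pvPairs (i + PySem.Str.len w) ws := by
  unfold pvPairs
  rw [pvBounds_cons]
  obtain ⟨j, rest, h⟩ : ∃ j rest, pvBounds (i + PySem.Str.len w) ws = j :: rest := by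
    cases hb : pvBounds (i + PySem.Str.len w) ws with
    | nil => exact absurd hb (pvBounds_ne_nil _ _)
    | cons j rest => exact ⟨j, rest, rfl⟩
  have hj : j = i + PySem.Str.len w := by
    have := pvBounds_head (i + PySem.Str.len w) ws
    rw [h] at this; simpa using this
  rw [h, hj]
  simp

lemma pvA_eq_pairs (ws : List String) (i : Int) (acc : List (List Int)) :
    (ws.foldl pvAStep (i, acc)).2 = acc ++ pvPairs i ws := by
  induction ws generalizing i acc with
  | nil => simp [pvPairs, pvBounds]
  | cons w ws ih =>
      simp only [List.foldl_cons, pvAStep, pvPairs_cons]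
      rw [ih]
      simp

-- ===== VERDICT (by name: the statement is the Claim_ definition above) =====
theorem words_to_index_spec : Claim_equal_words_to_index := by
  intro seg _
  show words_to_index seg = words_to_index_alt seg
  have h := pvA_eq_pairs seg 0 []
  simpa [words_to_index, words_to_index_alt, pvAStep, pvPairs, pvBounds] using h
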